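-- pv_equiv track=rewrite | github.com/wkl66621/GraduationWork_model | src/processors/coban_text_preprocessor.py | collect_context_tokens
-- ===== SOURCE A (Python) =====
-- from typing import Iterable, List, Optional, Sequence, Set, Tuple
--
-- def collect_context_tokens(
--     tokens: Sequence[str],
--     term_ranges: Sequence[Tuple[int, int]],
--     context_span: int = 20,
-- ) -> List[str]:
--     """基于术语出现位置提取上下文 token。
--
--     Args:
--         tokens: 文档 token 序列。
--         term_ranges: 术语命中区间列表，元素格式为 `(start, end_exclusive)`。
--         context_span: 上下文窗口半径（左右各取多少 token）。
--
--     Returns: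
--         List[str]: 去重后的上下文 token 列表。
--     """
--
--     if not tokens or not term_ranges:
--         return []
--     span = max(0, context_span)
--     if span == 0:
--         return []
--
--     collected: Set[str] = set()
--     token_length = len(tokens)
--     for start, end in term_ranges:
--         left_start = max(0, start - span)
--         right_end = min(token_length, end + span)
--         for idx in range(left_start, right_end):
--             if start <= idx < end:
--                 continue
--             item = tokens[idx].strip()
--             if item:
--                 collected.add(item)
--     return sorted(collected)
-- ===== SOURCE B (Python) =====
-- def collect_context_tokens(tokens, term_ranges, context_span=20):
--     if not tokens or not term_ranges:
--         return []
--     span = max(0, context_span)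
--     if span == 0:
--         return []
--     n = len(tokens)
--     diff = [0] * (n + 1)
--
--     def mark(lo, hi):
--         lo = max(0, lo)
--         hi = min(n, hi)
--         if lo < hi:
--             diff[lo] += 1
--             diff[hi] -= 1
--
--     for start, end in term_ranges:
--         left_start = max(0, start - span)
--         right_end = min(n, end + span)
--         mark(left_start, min(start, right_end))
--         mark(max(end, left_start), right_end)
--
--     collected = set()
--     cov = 0
--     for i, tok in enumerate(tokens):
--         cov += diff[i]
--         if cov > 0:
--             item = tok.strip()
--             if item:
--                 collected.add(item)
--     return sorted(collected)
-- ===== Notes on version B (the rewrite author's own statement) =====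
-- stated objective: faster
-- what changed: Replaces the per-range window scan (which revisits the same indices for overlapping windows) by a difference-array coverage count built in O(m), followed by a single prefix-sum pass over the tokens collecting those with positive coverage.
import Mathlib
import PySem

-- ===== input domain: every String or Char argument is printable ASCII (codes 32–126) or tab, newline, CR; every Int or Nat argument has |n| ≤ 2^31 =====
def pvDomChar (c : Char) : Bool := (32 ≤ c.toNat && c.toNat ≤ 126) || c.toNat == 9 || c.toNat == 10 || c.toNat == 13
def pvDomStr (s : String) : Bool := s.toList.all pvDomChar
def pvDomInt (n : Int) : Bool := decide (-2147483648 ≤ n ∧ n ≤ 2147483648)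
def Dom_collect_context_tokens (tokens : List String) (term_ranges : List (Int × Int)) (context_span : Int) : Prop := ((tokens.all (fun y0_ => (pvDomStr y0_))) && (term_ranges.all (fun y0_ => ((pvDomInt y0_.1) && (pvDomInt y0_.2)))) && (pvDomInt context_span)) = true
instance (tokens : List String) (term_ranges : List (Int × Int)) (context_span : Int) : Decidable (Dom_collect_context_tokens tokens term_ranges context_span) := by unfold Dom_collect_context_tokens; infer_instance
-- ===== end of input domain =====

-- B replaces A's per-range window scan by a difference-array coverage count plus one
-- prefix-sum pass over the tokens (objective: faster; asymptotic, O(n+m+k log k) vs O(m·window)).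

-- ===== PORT A =====
def collect_context_tokens (tokens : List String) (term_ranges : List (Int × Int)) (context_span : Int) : List String :=
  if tokens = [] ∨ term_ranges = [] then []
  else
    let span := max 0 context_span
    if span = 0 then []
    else
      let token_length : Int := PySem.List.len tokens
      let collected : PySem.Set String :=
        term_ranges.foldl (fun collected se =>
          let left_start := max 0 (se.1 - span)
          let right_end := min token_length (se.2 + span)
          (PySem.List.pyRange left_start right_end 1).foldl (fun collected idx =>
            if se.1 ≤ idx ∧ idx < se.2 then collected
            else
              let item := PySem.Str.strip (PySem.List.pyGetD tokens idx "")
              if item ≠ "" then PySem.Set.add collected item else collected) collected)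
          PySem.Set.empty
      PySem.List.sorted collected (fun x => x) false

-- ===== PORT B =====
-- helper `mark(lo, hi)` of Source B (n = len(tokens); clamps, then bumps the difference array)
def ctxMark (n : Int) (diff : List Int) (lo hi : Int) : List Int :=
  let lo := max 0 lo
  let hi := min n hi
  if lo < hi then
    let d1 := PySem.List.pySetD diff lo (PySem.List.pyGetD diff lo 0 + 1)
    PySem.List.pySetD d1 hi (PySem.List.pyGetD d1 hi 0 - 1)
  else diff

def collect_context_tokens_alt (tokens : List String) (term_ranges : List (Int × Int)) (context_span : Int) : List String :=
  if tokens = [] ∨ term_ranges = [] then []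
  else
    let span := max 0 context_span
    if span = 0 then []
    else
      let n : Int := PySem.List.len tokens
      let diff : List Int :=
        term_ranges.foldl (fun diff se =>
          let left_start := max 0 (se.1 - span)
          let right_end := min n (se.2 + span)
          let diff := ctxMark n diff left_start (min se.1 right_end)
          ctxMark n diff (max se.2 left_start) right_end)
          (List.replicate (tokens.length + 1) 0)
      let final := (PySem.List.enumerate tokens 0).foldl (fun st p =>
          let cov := st.1 + PySem.List.pyGetD diff p.1 0
          let st2 := if 0 < cov then
              let item := PySem.Str.strip p.2
              if item ≠ "" then PySem.Set.add st.2 item else st.2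
            else st.2
          (cov, st2)) ((0 : Int), (PySem.Set.empty : PySem.Set String))
      PySem.List.sorted final.2 (fun x => x) false

-- ===== PRECONDITION & SPEC =====
def Spec_collect_context_tokens (tokens : List String) (term_ranges : List (Int × Int)) (context_span : Int) (out : List String) : Prop := out = collect_context_tokens_alt tokens term_ranges context_span
instance (tokens : List String) (term_ranges : List (Int × Int)) (context_span : Int) (out : List String) : Decidable (Spec_collect_context_tokens tokens term_ranges context_span out) := by unfold Spec_collect_context_tokens; infer_instance

-- ===== CLAIM (what is proved, stated in full; the proofs are below) =====
def Claim_equal_collect_context_tokens : Prop := ∀ (tokens : List String) (term_ranges : List (Int × Int)) (context_span : Int), Dom_collect_context_tokens tokens term_ranges context_span → Spec_collect_context_tokens tokens term_ranges context_span (collect_context_tokens tokens term_ranges context_span)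

-- ===== LEMMAS AND PROOFS =====

-- `ctxCov n span s e i`: index i is visited (and not skipped) by A's inner loop for range (s,e).
def ctxCov (n span s e i : Int) : Prop :=
  max 0 (s - span) ≤ i ∧ i < min n (e + span) ∧ ¬ (s ≤ i ∧ i < e)

-- prefix sum of the difference array up to (and including) index m
def ctxPS (diff : List Int) (m : Nat) : Int :=
  ((List.range (m + 1)).map (fun j => diff.getD j 0)).sum


lemma mem_condAdd (P : Int → Prop) [DecidablePred P] (v : Int → String) (l : List Int)
    (acc : List String) (x : String) :
    x ∈ l.foldl (fun a i => if P i then a else if v i ≠ "" then PySem.Set.add a (v i) else a) acc ↔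
      x ∈ acc ∨ ∃ i ∈ l, ¬ P i ∧ v i ≠ "" ∧ v i = x := by
  induction l generalizing acc with
  | nil => simp
  | cons hd tl ih =>
    simp only [List.foldl_cons, List.mem_cons]
    rw [ih]
    by_cases hP : P hd
    · simp only [if_pos hP]
      constructor
      · rintro (h | ⟨i, hi, h⟩)
        · exact Or.inl h
        · exact Or.inr ⟨i, Or.inr hi, h⟩
      · rintro (h | ⟨i, hi | hi, h⟩)
        · exact Or.inl h
        · subst hi; exact absurd hP h.1
        · exact Or.inr ⟨i, hi, h⟩
    · simp only [if_neg hP]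
      by_cases hv : v hd = ""
      · simp only [hv, ne_eq, not_true_eq_false, if_false]
        constructor
        · rintro (h | ⟨i, hi, h⟩)
          · exact Or.inl h
          · exact Or.inr ⟨i, Or.inr hi, h⟩
        · rintro (h | ⟨i, hi | hi, h⟩)
          · exact Or.inl h
          · subst hi; exact absurd hv h.2.1
          · exact Or.inr ⟨i, hi, h⟩
      · simp only [hv, ne_eq, not_false_eq_true, if_true, PySem.Set.mem_add]
        constructor
        · rintro ((h | h) | ⟨i, hi, h⟩)
          · exact Or.inl h
          · exact Or.inr ⟨hd, Or.inl rfl, hP, hv, h.symm⟩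

          · exact Or.inr ⟨i, Or.inr hi, h⟩
        · rintro (h | ⟨i, hi | hi, h⟩)
          · exact Or.inl (Or.inl h)
          · subst hi; exact Or.inl (Or.inr h.2.2.symm)
          · exact Or.inr ⟨i, hi, h⟩

lemma nodup_condAdd (P : Int → Prop) [DecidablePred P] (v : Int → String) (l : List Int)
    (acc : List String) (h : acc.Nodup) :
    (l.foldl (fun a i => if P i then a else if v i ≠ "" then PySem.Set.add a (v i) else a) acc).Nodup := by
  induction l generalizing acc with
  | nil => exact h
  | cons hd tl ih =>
    simp only [List.foldl_cons]
    apply ih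
    split_ifs with h1 h2
    · exact h
    · exact PySem.Set.nodup_add _ _ h
    · exact h

lemma mem_inner_fold (s e L R : Int) (v : Int → String) (acc : List String) (x : String) :
    x ∈ (PySem.List.pyRange L R 1).foldl (fun a i =>
        if s ≤ i ∧ i < e then a
        else if v i ≠ "" then PySem.Set.add a (v i) else a) acc ↔
      x ∈ acc ∨ ∃ i, (L ≤ i ∧ i < R) ∧ ¬ (s ≤ i ∧ i < e) ∧ v i ≠ "" ∧ v i = x := by
  rw [mem_condAdd (fun i => s ≤ i ∧ i < e) v]
  constructor
  · rintro (h | ⟨i, hi, h⟩)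
    · exact Or.inl h
    · exact Or.inr ⟨i, PySem.List.mem_pyRange_one.mp hi, h⟩
  · rintro (h | ⟨i, hi, h⟩)
    · exact Or.inl h
    · exact Or.inr ⟨i, PySem.List.mem_pyRange_one.mpr hi, h⟩

lemma mem_A_fold (tokens : List String) (ranges : List (Int × Int)) (span n : Int)
    (acc : List String) (x : String) :
    x ∈ ranges.foldl (fun collected se =>
        (PySem.List.pyRange (max 0 (se.1 - span)) (min n (se.2 + span)) 1).foldl (fun a idx =>
          if se.1 ≤ idx ∧ idx < se.2 then a
          else if PySem.Str.strip (PySem.List.pyGetD tokens idx "") ≠ "" then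
            PySem.Set.add a (PySem.Str.strip (PySem.List.pyGetD tokens idx "")) else a) collected) acc ↔
      x ∈ acc ∨ ∃ se ∈ ranges, ∃ i, ctxCov n span se.1 se.2 i ∧
        PySem.Str.strip (PySem.List.pyGetD tokens i "") ≠ "" ∧
        PySem.Str.strip (PySem.List.pyGetD tokens i "") = x := by
  induction ranges generalizing acc with
  | nil => simp
  | cons hd tl ih =>
    simp only [List.foldl_cons, List.mem_cons]
    rw [ih, mem_inner_fold]
    unfold ctxCov
    constructor
    · rintro ((h | ⟨i, h1, h2, h3, h4⟩) | ⟨se, hse, i, h⟩)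
      · exact Or.inl h
      · exact Or.inr ⟨hd, Or.inl rfl, i, ⟨h1.1, h1.2, h2⟩, h3, h4⟩
      · exact Or.inr ⟨se, Or.inr hse, i, h⟩
    · rintro (h | ⟨se, hse | hse, i, h⟩)
      · exact Or.inl (Or.inl h)
      · subst hse; exact Or.inl (Or.inr ⟨i, ⟨h.1.1, h.1.2.1⟩, h.1.2.2, h.2⟩)
      · exact Or.inr ⟨se, hse, i, h⟩

lemma nodup_A_fold (tokens : List String) (ranges : List (Int × Int)) (span n : Int)
    (acc : List String) (h : acc.Nodup) :
    (ranges.foldl (fun collected se =>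
        (PySem.List.pyRange (max 0 (se.1 - span)) (min n (se.2 + span)) 1).foldl (fun a idx =>
          if se.1 ≤ idx ∧ idx < se.2 then a
          else if PySem.Str.strip (PySem.List.pyGetD tokens idx "") ≠ "" then
            PySem.Set.add a (PySem.Str.strip (PySem.List.pyGetD tokens idx "")) else a) collected) acc).Nodup := by
  induction ranges generalizing acc with
  | nil => exact h
  | cons hd tl ih =>
    simp only [List.foldl_cons]
    exact ih _ (nodup_condAdd (fun i => hd.1 ≤ i ∧ i < hd.2) _ _ _ h)

lemma getD_set_eq (d : List Int) (j i : Nat) (v : Int) (h : j < d.length) :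
    (d.set j v).getD i 0 = if i = j then v else d.getD i 0 := by
  by_cases hij : i = j
  · subst hij; simp [List.getD, h]
  · simp [List.getD, hij, List.getElem?_set_ne (Ne.symm hij)]

lemma ctxPS_set (d : List Int) (j : Nat) (v : Int) (hj : j < d.length) (m : Nat) :
    ctxPS (d.set j v) m = ctxPS d m + (if j ≤ m then v - d.getD j 0 else 0) := by
  unfold ctxPS
  have h1 : ∀ i : Nat, (d.set j v).getD i 0 = d.getD i 0 + (if i = j then v - d.getD j 0 else 0) := by
    intro i
    rw [getD_set_eq d j i v hj]
    by_cases hij : i = j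
    · subst hij; simp
    · simp [hij]
  show (∑ i ∈ Finset.range (m+1), (d.set j v).getD i 0) = (∑ i ∈ Finset.range (m+1), d.getD i 0) + _
  rw [Finset.sum_congr rfl (fun i _ => h1 i), Finset.sum_add_distrib,
    Finset.sum_ite_eq' (Finset.range (m+1)) j (fun _ => v - d.getD j 0)]
  simp only [Finset.mem_range]
  congr 1
  by_cases hjm : j ≤ m
  · rw [if_pos hjm, if_pos (by omega)]
  · rw [if_neg hjm, if_neg (by omega)]

lemma length_ctxMark (n : Int) (diff : List Int) (lo hi : Int) :
    (ctxMark n diff lo hi).length = diff.length := by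
  simp only [ctxMark]
  split_ifs with h
  · rw [PySem.List.pySetD_of_nonneg _ _ (by omega), PySem.List.pySetD_of_nonneg _ _ (by omega)]
    simp
  · rfl

lemma ctxPS_ctxMark (N : Nat) (diff : List Int) (hd : diff.length = N + 1) (lo hi : Int)
    (m : Nat) (_hm : m < N) :
    ctxPS (ctxMark (N : Int) diff lo hi) m
      = ctxPS diff m + (if max 0 lo ≤ (m : Int) ∧ (m : Int) < min (N : Int) hi then 1 else 0) := by
  simp only [ctxMark]
  by_cases h : max 0 lo < min (N:Int) hi
  · rw [if_pos h]
    have h0 : (0:Int) ≤ max 0 lo := by omega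
    have h0' : (0:Int) ≤ min (N:Int) hi := by omega
    have hltN : max 0 lo < (N:Int) + 1 := by omega
    have hhiN : min (N:Int) hi < (N:Int) + 1 := by omega
    have hne : (max 0 lo).toNat ≠ (min (N:Int) hi).toNat := by omega
    rw [PySem.List.pySetD_of_nonneg _ _ h0]
    rw [PySem.List.pyGetD_eq_getElem diff 0 h0 (by omega)]
    rw [PySem.List.pySetD_of_nonneg _ _ h0']
    rw [PySem.List.pyGetD_eq_getElem _ 0 h0' (by rw [List.length_set]; omega)]
    rw [ctxPS_set _ _ _ (by rw [List.length_set]; omega) m, ctxPS_set _ _ _ (by omega) m]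
    rw [List.getElem_set_ne hne]
    have e1 : diff.getD (max 0 lo).toNat 0 = diff[(max 0 lo).toNat]'(by omega) := by
      rw [List.getD_eq_getElem _ _ (by omega)]
    have e2 : (diff.set (max 0 lo).toNat (diff[(max 0 lo).toNat] + 1)).getD (min (N:Int) hi).toNat 0
        = diff[(min (N:Int) hi).toNat]'(by omega) := by
      rw [List.getD_eq_getElem _ _ (by rw [List.length_set]; omega), List.getElem_set_ne hne]
    rw [e1, e2]
    have hx1 : ((max 0 lo).toNat ≤ m) = (max 0 lo ≤ (m:Int)) := by
      apply propext; omega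
    have hx2 : ((min (N:Int) hi).toNat ≤ m) = (min (N:Int) hi ≤ (m:Int)) := by
      apply propext; omega
    simp only [hx1, hx2]
    split_ifs <;> first | ring1 | (exfalso; omega)
  · rw [if_neg h]
    have : ¬(max 0 lo ≤ (m:Int) ∧ (m:Int) < min (N:Int) hi) := by omega
    rw [if_neg this, add_zero]

lemma ctxPS_B_fold (N : Nat) (span : Int) (ranges : List (Int × Int)) (diff : List Int)
    (hd : diff.length = N + 1) (m : Nat) (hm : m < N) :
    ctxPS (ranges.foldl (fun diff se =>
        ctxMark (N : Int) (ctxMark (N : Int) diff (max 0 (se.1 - span))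
          (min se.1 (min (N : Int) (se.2 + span)))) (max se.2 (max 0 (se.1 - span)))
          (min (N : Int) (se.2 + span))) diff) m
      = ctxPS diff m + (ranges.map (fun se =>
          (if max 0 (max 0 (se.1 - span)) ≤ (m : Int) ∧ (m : Int) < min (N : Int) (min se.1 (min (N : Int) (se.2 + span))) then (1:Int) else 0)
          + (if max 0 (max se.2 (max 0 (se.1 - span))) ≤ (m : Int) ∧ (m : Int) < min (N : Int) (min (N : Int) (se.2 + span)) then (1:Int) else 0))).sum := by
  induction ranges generalizing diff with
  | nil => simp
  | cons hd2 tl ih =>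
    simp only [List.foldl_cons, List.map_cons, List.sum_cons]
    rw [ih _ (by rw [length_ctxMark, length_ctxMark]; exact hd)]
    rw [ctxPS_ctxMark N _ (by rw [length_ctxMark]; exact hd) _ _ m hm]
    rw [ctxPS_ctxMark N _ hd _ _ m hm]
    ring

lemma ctxPS_replicate (N m : Nat) : ctxPS (List.replicate (N + 1) (0:Int)) m = 0 := by
  unfold ctxPS
  have : ∀ j : Nat, (List.replicate (N + 1) (0:Int)).getD j 0 = 0 := by
    intro j
    simp [List.getD, List.getElem?_replicate]
    split_ifs <;> rfl
  rw [List.map_congr_left (fun j _ => this j)]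
  simp

lemma sum_pos_iff_exists {α : Type} (l : List α) (f : α → Int) (h : ∀ x ∈ l, 0 ≤ f x) :
    0 < (l.map f).sum ↔ ∃ x ∈ l, 0 < f x := by
  induction l with
  | nil => simp
  | cons hd tl ih =>
    have hh : ∀ x ∈ tl, 0 ≤ f x := fun x hx => h x (List.mem_cons_of_mem _ hx)
    have hrest : 0 ≤ (tl.map f).sum :=
      List.sum_nonneg (by intro x hx; obtain ⟨y, hy, rfl⟩ := List.mem_map.mp hx; exact hh y hy)
    have hhd : 0 ≤ f hd := h hd List.mem_cons_self
    simp only [List.map_cons, List.sum_cons, List.mem_cons]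
    constructor
    · intro hpos
      by_cases h1 : 0 < f hd
      · exact ⟨hd, Or.inl rfl, h1⟩
      · have : 0 < (tl.map f).sum := by omega
        obtain ⟨x, hx, hfx⟩ := (ih hh).mp this
        exact ⟨x, Or.inr hx, hfx⟩
    · rintro ⟨x, hx | hx, hfx⟩
      · subst hx; omega
      · have : 0 < (tl.map f).sum := (ih hh).mpr ⟨x, hx, hfx⟩
        omega

lemma B_sum_split (g : Nat → Int) (k m : Nat) :
    ((List.range (m + 2)).map (fun j => g (k + j))).sum
      = g k + ((List.range (m + 1)).map (fun j => g (k + 1 + j))).sum := by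
  rw [List.range_succ_eq_map]
  simp only [List.map_cons, List.sum_cons, List.map_map, Nat.add_zero]
  congr 1
  apply congrArg List.sum
  apply List.map_congr_left
  intro j _
  exact congrArg g (by omega)

lemma mem_B_loop (diff : List Int) (tl : List String) (k : Nat) (c : Int) (acc : List String)
    (x : String) :
    (x ∈ ((PySem.List.enumerate tl (k : Int)).foldl (fun st p =>
        ((st.1 + PySem.List.pyGetD diff p.1 0),
          if 0 < st.1 + PySem.List.pyGetD diff p.1 0 then
            if PySem.Str.strip p.2 ≠ "" then PySem.Set.add st.2 (PySem.Str.strip p.2) else st.2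
          else st.2)) (c, acc)).2) ↔
      x ∈ acc ∨ ∃ m : Nat, ∃ hm : m < tl.length,
        0 < c + ((List.range (m + 1)).map (fun j => diff.getD (k + j) 0)).sum ∧
        PySem.Str.strip tl[m] ≠ "" ∧ PySem.Str.strip tl[m] = x := by
  induction tl generalizing k c acc with
  | nil => simp [PySem.List.enumerate]
  | cons hd tl ih =>
    rw [PySem.List.enumerate_cons]
    simp only [List.foldl_cons]
    have hcast : ((k : Int) + 1) = ((k + 1 : Nat) : Int) := by push_cast; ring
    rw [hcast, PySem.List.pyGetD_natCast]
    rw [ih]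
    constructor
    · rintro (hmem | ⟨m, hm, hpos, hne, heq⟩)
      · by_cases h1 : 0 < c + diff.getD k 0
        · by_cases h2 : PySem.Str.strip hd = ""
          · rw [if_pos h1, if_neg (by simp [h2])] at hmem
            exact Or.inl hmem
          · rw [if_pos h1, if_pos h2] at hmem
            rcases (PySem.Set.mem_add _ _ _).mp hmem with h | h
            · exact Or.inl h
            · refine Or.inr ⟨0, by simp, ?_, ?_, ?_⟩
              · simpa using h1
              · simpa using h2
              · simpa using h.symm
        · rw [if_neg h1] at hmem
          exact Or.inl hmem
      · refine Or.inr ⟨m + 1, by simpa using Nat.succ_lt_succ hm, ?_, ?_, ?_⟩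
        · have hs := B_sum_split (fun j => diff.getD j 0) k m
          simp only [] at hs
          rw [show m + 1 + 1 = m + 2 from rfl, hs]
          omega
        · simpa using hne
        · simpa using heq
    · rintro (hmem | ⟨m, hm, hpos, hne, heq⟩)
      · left
        split_ifs with h1 h2
        · exact (PySem.Set.mem_add _ _ _).mpr (Or.inl hmem)
        · exact hmem
        · exact hmem
      · cases m with
        | zero =>
          left
          have h1 : 0 < c + diff.getD k 0 := by simpa using hpos
          simp only [List.getElem_cons_zero] at hne heq
          rw [if_pos h1, if_pos hne]
          exact (PySem.Set.mem_add _ _ _).mpr (Or.inr heq.symm)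
        | succ m' =>
          refine Or.inr ⟨m', by simp only [List.length_cons] at hm; omega, ?_, ?_, ?_⟩
          · have hs := B_sum_split (fun j => diff.getD j 0) k m'
            simp only [] at hs
            rw [show m' + 1 + 1 = m' + 2 from rfl, hs] at hpos
            omega
          · simpa using hne
          · simpa using heq

lemma nodup_B_loop (diff : List Int) (tl : List String) (k : Nat) (c : Int) (acc : List String)
    (h : acc.Nodup) :
    (((PySem.List.enumerate tl (k : Int)).foldl (fun st p =>
        ((st.1 + PySem.List.pyGetD diff p.1 0),
          if 0 < st.1 + PySem.List.pyGetD diff p.1 0 then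
            if PySem.Str.strip p.2 ≠ "" then PySem.Set.add st.2 (PySem.Str.strip p.2) else st.2
          else st.2)) (c, acc)).2).Nodup := by
  induction tl generalizing k c acc with
  | nil => simpa [PySem.List.enumerate]
  | cons hd tl ih =>
    rw [PySem.List.enumerate_cons]
    simp only [List.foldl_cons]
    have hcast : ((k : Int) + 1) = ((k + 1 : Nat) : Int) := by push_cast; ring
    rw [hcast]
    apply ih
    split_ifs with h1 h2
    · exact PySem.Set.nodup_add _ _ h
    · exact h
    · exact h

lemma length_B_fold (N span : Int) (ranges : List (Int × Int)) (diff : List Int) :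
    (ranges.foldl (fun diff se =>
        ctxMark N (ctxMark N diff (max 0 (se.1 - span)) (min se.1 (min N (se.2 + span))))
          (max se.2 (max 0 (se.1 - span))) (min N (se.2 + span))) diff).length = diff.length := by
  induction ranges generalizing diff with
  | nil => rfl
  | cons hd tl ih =>
    simp only [List.foldl_cons]
    rw [ih, length_ctxMark, length_ctxMark]

-- ===== VERDICT (by name: the statement is the Claim_ definition above) =====
theorem collect_context_tokens_spec : Claim_equal_collect_context_tokens := by
  intro tokens ranges cspan _hdom
  unfold Spec_collect_context_tokens
  simp only [collect_context_tokens, collect_context_tokens_alt, PySem.List.len_eq]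
  by_cases h1 : tokens = [] ∨ ranges = []
  · rw [if_pos h1, if_pos h1]
  · rw [if_neg h1, if_neg h1]
    by_cases h2 : max 0 cspan = 0
    · rw [if_pos h2, if_pos h2]
    · rw [if_neg h2, if_neg h2]
      set span := max 0 cspan with hspan
      set N := tokens.length with hN
      set diff := ranges.foldl (fun diff se =>
        ctxMark (N : Int) (ctxMark (N : Int) diff (max 0 (se.1 - span))
          (min se.1 (min (N : Int) (se.2 + span)))) (max se.2 (max 0 (se.1 - span)))
          (min (N : Int) (se.2 + span))) (List.replicate (N + 1) (0 : Int)) with hdiff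
      have hdlen : diff.length = N + 1 := by
        rw [hdiff, length_B_fold, List.length_replicate]
      -- positivity of the prefix sums ↔ coverage by some range
      have hps : ∀ m : Nat, m < N →
          (0 < ctxPS diff m ↔ ∃ se ∈ ranges, ctxCov (N : Int) span se.1 se.2 (m : Int)) := by
        intro m hm
        rw [hdiff, ctxPS_B_fold N span ranges _ (by rw [List.length_replicate]) m hm,
          ctxPS_replicate, zero_add]
        rw [sum_pos_iff_exists _ _ (by intro se _; split_ifs <;> omega)]
        apply exists_congr; intro se
        apply and_congr_right; intro _
        unfold ctxCov
        split_ifs <;> omega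
      -- the two collected sets have the same members
      have hmem : ∀ a : String,
          (a ∈ ranges.foldl (fun collected se =>
            (PySem.List.pyRange (max 0 (se.1 - span)) (min (N : Int) (se.2 + span)) 1).foldl (fun a idx =>
              if se.1 ≤ idx ∧ idx < se.2 then a
              else if PySem.Str.strip (PySem.List.pyGetD tokens idx "") ≠ "" then
                PySem.Set.add a (PySem.Str.strip (PySem.List.pyGetD tokens idx "")) else a) collected)
            PySem.Set.empty) ↔
          (a ∈ ((PySem.List.enumerate tokens ((0 : Nat) : Int)).foldl (fun st p =>
            ((st.1 + PySem.List.pyGetD diff p.1 0),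
              if 0 < st.1 + PySem.List.pyGetD diff p.1 0 then
                if PySem.Str.strip p.2 ≠ "" then PySem.Set.add st.2 (PySem.Str.strip p.2) else st.2
              else st.2)) ((0 : Int), (PySem.Set.empty : PySem.Set String))).2) := by
        intro a
        rw [mem_A_fold tokens ranges span (N : Int) _ a, mem_B_loop diff tokens 0 0 _ a]
        simp only [PySem.Set.empty, List.not_mem_nil, false_or, Nat.zero_add]
        constructor
        · rintro ⟨se, hse, i, hcov, hne, heq⟩
          have h0i : 0 ≤ i ∧ i < (N : Int) := by
            unfold ctxCov at hcov; omega
          have hiN : i.toNat < N := by omega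
          have hieq : ((i.toNat : Nat) : Int) = i := by omega
          have hget : PySem.List.pyGetD tokens i "" = tokens[i.toNat] :=
            PySem.List.pyGetD_eq_getElem tokens "" h0i.1 (by rw [← hN]; exact h0i.2)
          refine ⟨i.toNat, hiN, ?_, ?_, ?_⟩
          · rw [zero_add]
            exact (hps i.toNat hiN).mpr ⟨se, hse, by rw [hieq]; exact hcov⟩
          · rw [← hget]; exact hne
          · rw [← hget]; exact heq
        · rintro ⟨m, hm, hpos, hne, heq⟩
          rw [zero_add] at hpos
          obtain ⟨se, hse, hcov⟩ := (hps m hm).mp hpos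
          have hget : PySem.List.pyGetD tokens (m : Int) "" = tokens[m] :=
            PySem.List.pyGetD_eq_getElem tokens "" (by omega) (by rw [← hN]; omega)
          exact ⟨se, hse, (m : Int), hcov, by rw [hget]; exact hne, by rw [hget]; exact heq⟩
      have hndA := nodup_A_fold tokens ranges span (N : Int) PySem.Set.empty List.nodup_nil
      have hndB := nodup_B_loop diff tokens 0 0 PySem.Set.empty List.nodup_nil
      exact PySem.List.sorted_eq_sorted_of_perm _ _ _ (fun a b h => h)
        ((List.perm_ext_iff_of_nodup hndA hndB).mpr hmem)
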